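-- pv_equiv track=rewrite | github.com/igglyn/Dataset | distill_factory/data/selection.py | enforce_minimum_selected_positions
-- ===== SOURCE A (Python) =====
-- def enforce_minimum_selected_positions(mask: list[bool], minimum_selected_positions: int) -> list[bool]:
--     """Ensure at least ``minimum_selected_positions`` positions are selected.
--
--     If the mask already satisfies the minimum, it is returned as-is.
--     Otherwise, additional positions are enabled from left to right.
--     """
--     minimum = int(minimum_selected_positions)
--     if minimum <= 0 or not mask:
--         return list(mask)
--
--     out = [bool(v) for v in mask]
--     selected = sum(1 for v in out if v)
--     if selected >= minimum:
--         return out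
--
--     need = minimum - selected
--     for i, current in enumerate(out):
--         if not current:
--             out[i] = True
--             need -= 1
--             if need == 0:
--                 break
--     return out
-- ===== SOURCE B (Python) =====
-- def enforce_minimum_selected_positions(mask: list[bool], minimum_selected_positions: int) -> list[bool]:
--     """Ensure at least ``minimum_selected_positions`` positions are selected.
--
--     Hop-and-splice strategy: instead of scanning every element and flipping
--     Falses one by one, jump directly between False positions with the
--     built-in ``list.index`` search `need` times to locate the cut point
--     (the position just past the `need`-th False), then rebuild the answer
--     as an all-True prefix spliced onto the untouched tail.  Everything up
--     to the cut is True anyway (the Trues were already True, the Falses get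
--     enabled), so no individual flipping is needed.
--     """
--     minimum = int(minimum_selected_positions)
--     if minimum <= 0 or not mask:
--         return list(mask)
--
--     out = [bool(v) for v in mask]
--     need = minimum - sum(out)
--     if need <= 0:
--         return out
--
--     pos = -1
--     try:
--         for _ in range(need):
--             pos = out.index(False, pos + 1)
--         cut = pos + 1
--     except ValueError:
--         cut = len(out)  # fewer than `need` Falses: everything becomes True
--     return [True] * cut + out[cut:]
-- ===== Notes on version B (the rewrite author's own statement) =====
-- stated objective: alternative
-- what changed: Instead of A's element-by-element scan that flips Falses with a running need counter and early break, B hops directly between False positions using list.index(False, pos+1) need times to find a cut point, then rebuilds the result as an all-True prefix spliced onto the untouched tail.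
import Mathlib
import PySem

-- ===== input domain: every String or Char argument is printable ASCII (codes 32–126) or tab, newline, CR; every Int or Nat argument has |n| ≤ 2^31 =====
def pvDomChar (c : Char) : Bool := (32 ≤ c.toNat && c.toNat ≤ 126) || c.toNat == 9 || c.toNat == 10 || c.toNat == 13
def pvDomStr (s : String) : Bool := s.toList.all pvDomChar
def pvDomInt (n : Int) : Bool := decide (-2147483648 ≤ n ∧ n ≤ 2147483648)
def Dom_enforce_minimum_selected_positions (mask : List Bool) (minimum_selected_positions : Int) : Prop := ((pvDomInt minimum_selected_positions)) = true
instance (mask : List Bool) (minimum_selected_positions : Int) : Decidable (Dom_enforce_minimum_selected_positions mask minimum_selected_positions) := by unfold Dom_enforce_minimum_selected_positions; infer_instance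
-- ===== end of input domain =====

-- B replaces A's element-by-element flip loop by hopping between False positions with
-- list.index and splicing an all-True prefix onto the untouched tail; alternative decomposition.

-- ===== PORT A =====
-- the for-loop over enumerate(out) with the running `need` counter and the early break
def pvLoopA (xs : List Bool) (need : Int) : List Bool :=
  match xs with
  | [] => []
  | v :: rest =>
    if v then v :: pvLoopA rest need
    else if need - 1 = 0 then true :: rest
    else true :: pvLoopA rest (need - 1)

def enforce_minimum_selected_positions (mask : List Bool) (minimum_selected_positions : Int) : List Bool :=
  if minimum_selected_positions ≤ 0 ∨ mask = [] then mask
  else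
    let out := mask
    let selected : Int := ((out.filter (fun v => v)).length : Int)
    if selected ≥ minimum_selected_positions then out
    else pvLoopA out (minimum_selected_positions - selected)

-- ===== PORT B =====
-- hand port of `out.index(False, s)` (exact: first index ≥ s holding False, none = ValueError)
def pvFirstFalse (xs : List Bool) : Option Nat :=
  match xs with
  | [] => none
  | v :: rest => if v then (pvFirstFalse rest).map (· + 1) else some 0

def pvIndexFrom (out : List Bool) (s : Nat) : Option Nat :=
  (pvFirstFalse (out.drop s)).map (s + ·)

-- the `for _ in range(need)` hop loop; state s = pos + 1; none = ValueError escape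
def pvHop (out : List Bool) (s : Nat) : Nat → Option Nat
  | 0 => some s
  | n + 1 =>
    match pvIndexFrom out s with
    | none => none
    | some p => pvHop out (p + 1) n

def enforce_minimum_selected_positions_alt (mask : List Bool) (minimum_selected_positions : Int) : List Bool :=
  if minimum_selected_positions ≤ 0 ∨ mask = [] then mask
  else
    let out := mask
    let need : Int := minimum_selected_positions - ((out.filter (fun v => v)).length : Int)
    if need ≤ 0 then out
    else
      let cut : Nat :=
        match pvHop out 0 need.toNat with
        | some c => c
        | none => out.length
      List.replicate cut true ++ out.drop cut

-- ===== PRECONDITION & SPEC =====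
def Spec_enforce_minimum_selected_positions (mask : List Bool) (minimum_selected_positions : Int) (out : List Bool) : Prop := out = enforce_minimum_selected_positions_alt mask minimum_selected_positions
instance (mask : List Bool) (minimum_selected_positions : Int) (out : List Bool) : Decidable (Spec_enforce_minimum_selected_positions mask minimum_selected_positions out) := by unfold Spec_enforce_minimum_selected_positions; infer_instance

-- ===== CLAIM (what is proved, stated in full; the proofs are below) =====
def Claim_equal_enforce_minimum_selected_positions : Prop := ∀ (mask : List Bool) (minimum_selected_positions : Int), Dom_enforce_minimum_selected_positions mask minimum_selected_positions → Spec_enforce_minimum_selected_positions mask minimum_selected_positions (enforce_minimum_selected_positions mask minimum_selected_positions)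

-- ===== LEMMAS AND PROOFS =====

-- relative hop: same loop, but positions measured inside the current suffix
def pvHopRel : List Bool → Nat → Option Nat
  | _, 0 => some 0
  | tail, n + 1 =>
    match pvFirstFalse tail with
    | none => none
    | some j => (pvHopRel (tail.drop (j + 1)) n).map (fun c => j + 1 + c)

theorem pvHop_eq_rel : ∀ (n : Nat) (out : List Bool) (s : Nat),
    pvHop out s n = (pvHopRel (out.drop s) n).map (s + ·) := by
  intro n
  induction n with
  | zero => intro out s; simp [pvHop, pvHopRel]
  | succ m ih =>
    intro out s
    simp only [pvHop, pvHopRel, pvIndexFrom]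
    cases h : pvFirstFalse (out.drop s) with
    | none => simp
    | some j =>
      simp only [Option.map_some]
      rw [ih out (s + j + 1)]
      have hd : out.drop (s + j + 1) = (out.drop s).drop (j + 1) := by
        rw [List.drop_drop]; ring_nf
      rw [hd]
      cases pvHopRel ((out.drop s).drop (j + 1)) m with
      | none => simp
      | some c => simp; omega

theorem pvHopRel_cons_true : ∀ (n : Nat) (rest : List Bool),
    pvHopRel (true :: rest) (n + 1) = (pvHopRel rest (n + 1)).map (· + 1) := by
  intro n rest
  have h1 : pvFirstFalse (true :: rest) = (pvFirstFalse rest).map (· + 1) := by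
    simp [pvFirstFalse]
  cases h : pvFirstFalse rest with
  | none => simp [pvHopRel, h1, h]
  | some j =>
    simp only [pvHopRel, h1, h, Option.map_some, List.drop_succ_cons]
    cases pvHopRel (rest.drop (j + 1)) n with
    | none => simp
    | some c => simp; omega

-- the heart: A's flip loop produces an all-True prefix up to the hop loop's cut, then the tail
theorem loopA_eq_splice : ∀ (tail : List Bool) (n : Nat),
    pvLoopA tail ((n : Int) + 1) =
      (match pvHopRel tail (n + 1) with
       | some c => List.replicate c true ++ tail.drop c
       | none => List.replicate tail.length true) := by
  intro tail
  induction tail with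
  | nil => intro n; simp [pvLoopA, pvHopRel, pvFirstFalse]
  | cons v rest ih =>
    intro n
    by_cases hv : v
    · subst hv
      rw [pvHopRel_cons_true]
      have hA : pvLoopA (true :: rest) ((n : Int) + 1) = true :: pvLoopA rest ((n : Int) + 1) := by
        simp [pvLoopA]
      rw [hA, ih n]
      cases pvHopRel rest (n + 1) with
      | none => simp [List.replicate_succ]
      | some c => simp [List.replicate_succ]
    · simp only [Bool.not_eq_true] at hv; subst hv
      have hrel : pvHopRel (false :: rest) (n + 1) = (pvHopRel rest n).map (1 + ·) := by
        simp [pvHopRel, pvFirstFalse]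
      rw [hrel]
      cases n with
      | zero =>
        simp [pvLoopA, pvHopRel, List.replicate_succ]
      | succ m =>
        have hA : pvLoopA (false :: rest) ((m + 1 : Nat) + 1 : Int)
            = true :: pvLoopA rest ((m : Int) + 1) := by
          have h2 : ((m + 1 : Nat) : Int) + 1 - 1 = (m : Int) + 1 := by push_cast; ring
          have h4 : ¬ ((m : Int) + 1 = 0) := by omega
          simp only [pvLoopA, Bool.false_eq_true, if_false]
          rw [h2, if_neg h4]
        rw [hA, ih m]
        cases pvHopRel rest (m + 1) with
        | none => simp [List.replicate_succ]
        | some c =>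
          simp only [Option.map_some]
          rw [Nat.add_comm 1 c]
          simp [List.replicate_succ]

-- ===== VERDICT (by name: the statement is the Claim_ definition above) =====
theorem enforce_minimum_selected_positions_spec : Claim_equal_enforce_minimum_selected_positions := by
  intro mask minimum _
  unfold Spec_enforce_minimum_selected_positions
  unfold enforce_minimum_selected_positions enforce_minimum_selected_positions_alt
  by_cases hg : minimum ≤ 0 ∨ mask = []
  · simp [hg]
  · simp only [if_neg hg]
    set sel : Int := ((mask.filter (fun v => v)).length : Int) with hsel
    by_cases hc : sel ≥ minimum
    · simp [hc, show minimum - sel ≤ 0 from by omega]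
    · have hneed : ¬ (minimum - sel ≤ 0) := by omega
      simp only [if_neg hc, if_neg hneed]
      obtain ⟨n, hn⟩ : ∃ n : Nat, (minimum - sel).toNat = n + 1 :=
        ⟨(minimum - sel).toNat - 1, by omega⟩
      have hcast : (minimum - sel) = (n : Int) + 1 := by omega
      rw [hcast, loopA_eq_splice mask n]
      have htn : ((n : Int) + 1).toNat = n + 1 := by omega
      rw [htn, pvHop_eq_rel (n + 1) mask 0]
      simp only [List.drop_zero]
      cases pvHopRel mask (n + 1) with
      | none => simp
      | some c => simp
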